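-- pv_equiv track=rewrite | github.com/Extrieve/HackerRank-Python | bounded_ratio.py | boundedRatio
-- ===== SOURCE A (Python) =====
-- def boundedRatio(a, l, r):
--     myBool = [False] * len(a)
--     for i in range(1, len(a) + 1):
--         if i * l > a[i-1]:
--             continue
--         elif i * r < a[i-1]:
--             continue
--         else:
--             for j in range(l, r+1):
--                 if j * i == a[i-1]:
--                     myBool[i-1] = True
--     return myBool
-- ===== SOURCE B (Python) =====
-- def boundedRatio(a, l, r):
--     # j*i == a[i-1] for some j in [l, r]  <=>  i divides a[i-1] and l <= a[i-1]//i <= r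
--     return [x % (i + 1) == 0 and l <= x // (i + 1) <= r for i, x in enumerate(a)]
-- ===== Notes on version B (the rewrite author's own statement) =====
-- stated objective: simpler
-- what changed: Replaced the guarded nested loop over every j in [l,r] by a direct divisibility check per element (a[i-1] % i == 0 and l <= a[i-1]//i <= r) in a single comprehension.
import Mathlib
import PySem

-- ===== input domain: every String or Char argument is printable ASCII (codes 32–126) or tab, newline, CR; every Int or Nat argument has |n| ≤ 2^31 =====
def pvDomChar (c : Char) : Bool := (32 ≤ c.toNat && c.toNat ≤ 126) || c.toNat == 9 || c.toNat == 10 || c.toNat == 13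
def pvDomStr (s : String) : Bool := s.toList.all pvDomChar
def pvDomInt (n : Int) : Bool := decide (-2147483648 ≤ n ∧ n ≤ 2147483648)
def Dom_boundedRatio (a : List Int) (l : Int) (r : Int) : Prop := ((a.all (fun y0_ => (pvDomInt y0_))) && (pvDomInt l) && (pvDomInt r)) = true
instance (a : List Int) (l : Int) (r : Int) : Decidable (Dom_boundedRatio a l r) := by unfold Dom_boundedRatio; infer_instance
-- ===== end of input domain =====

-- B replaces A's guarded inner scan over j ∈ [l,r] with a direct per-element divisibility/quotient check (simpler, one comprehension).

-- ===== PORT A =====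
def boundedRatio (a : List Int) (l : Int) (r : Int) : List Bool :=
  (PySem.List.pyRange 1 ((a.length : Int) + 1) 1).foldl
    (fun myBool i =>
      if i * l > PySem.List.pyGetD a (i - 1) 0 then myBool
      else if i * r < PySem.List.pyGetD a (i - 1) 0 then myBool
      else
        (PySem.List.pyRange l (r + 1) 1).foldl
          (fun b j =>
            if j * i == PySem.List.pyGetD a (i - 1) 0 then PySem.List.pySetD b (i - 1) true
            else b)
          myBool)
    (List.replicate a.length false)

-- ===== PORT B =====
def boundedRatio_alt (a : List Int) (l : Int) (r : Int) : List Bool :=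
  (PySem.List.enumerate a 0).map (fun p =>
    decide (PySem.Int.mod p.2 (p.1 + 1) = 0) &&
    (decide (l ≤ PySem.Int.floordiv p.2 (p.1 + 1)) &&
     decide (PySem.Int.floordiv p.2 (p.1 + 1) ≤ r)))

-- ===== PRECONDITION & SPEC =====
def Spec_boundedRatio (a : List Int) (l : Int) (r : Int) (out : List Bool) : Prop := out = boundedRatio_alt a l r
instance (a : List Int) (l : Int) (r : Int) (out : List Bool) : Decidable (Spec_boundedRatio a l r out) := by unfold Spec_boundedRatio; infer_instance

-- ===== CLAIM (what is proved, stated in full; the proofs are below) =====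
def Claim_equal_boundedRatio : Prop := ∀ (a : List Int) (l : Int) (r : Int), Dom_boundedRatio a l r → Spec_boundedRatio a l r (boundedRatio a l r)

-- ===== LEMMAS AND PROOFS =====

-- "there is j ∈ [l,r] with j*i = x" as a Bool, for row index k (i = k+1)
def hitB (a : List Int) (l r : Int) (k : Nat) : Bool :=
  (PySem.List.pyRange l (r + 1) 1).any (fun j => j * ((k : Int) + 1) == a.getD k 0)

-- the inner loop either sets index once or leaves the list unchanged
theorem inner_foldl (js : List Int) (i ai : Int) (idx : Nat) (b : List Bool) :
    js.foldl (fun b j => if j * i == ai then PySem.List.pySetD b (idx : Int) true else b) b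
      = if js.any (fun j => j * i == ai) then PySem.List.pySetD b (idx : Int) true else b := by
  induction js generalizing b with
  | nil => simp
  | cons j js ih =>
    simp only [List.foldl_cons, List.any_cons]
    by_cases h : (j * i == ai) = true
    · simp only [h, if_true]
      rw [ih]
      simp [PySem.List.pySetD_natCast, List.set_set]
    · rw [if_neg h, ih]
      simp [h]

-- if the guard fires (i*l > ai or i*r < ai, i > 0) then no j ∈ [l,r] hits
theorem no_hit_of_guard (l r i ai : Int) (hi : 0 < i)
    (h : i * l > ai ∨ i * r < ai) :
    (PySem.List.pyRange l (r + 1) 1).any (fun j => j * i == ai) = false := by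
  simp only [List.any_eq_false, PySem.List.mem_pyRange_one, beq_iff_eq]
  rintro j ⟨hl, hr⟩ hj
  rcases h with h | h
  · nlinarith
  · nlinarith

-- the outer loop after m iterations: first m entries decided, the rest still false
theorem outer_loop (a : List Int) (l r : Int) (m : Nat) (hm : m ≤ a.length) :
    (PySem.List.pyRange 1 ((m : Int) + 1) 1).foldl
      (fun myBool i =>
        if i * l > PySem.List.pyGetD a (i - 1) 0 then myBool
        else if i * r < PySem.List.pyGetD a (i - 1) 0 then myBool
        else
          (PySem.List.pyRange l (r + 1) 1).foldl
            (fun b j =>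
              if j * i == PySem.List.pyGetD a (i - 1) 0 then PySem.List.pySetD b (i - 1) true
              else b)
            myBool)
      (List.replicate a.length false)
      = (List.range a.length).map (fun k => if k < m then hitB a l r k else false) := by
  induction m with
  | zero =>
    rw [show ((0 : Nat) : Int) + 1 = 1 by norm_num, PySem.List.pyRange_one_eq_nil (a := 1) (b := 1) (by norm_num)]
    simp [List.map_const']
  | succ m ih =>
    have hm' : m ≤ a.length := by omega
    rw [show ((m + 1 : Nat) : Int) + 1 = ((m : Int) + 1) + 1 by push_cast; ring,
        PySem.List.pyRange_one_append 1 ((m : Int) + 1) (((m : Int) + 1) + 1) (by omega) (by omega),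
        PySem.List.pyRange_one_singleton, List.foldl_append, ih hm']
    simp only [List.foldl_cons, List.foldl_nil]
    have hidx : (m : Int) + 1 - 1 = ((m : Nat) : Int) := by ring
    have hget : PySem.List.pyGetD a ((m : Nat) : Int) 0 = a.getD m 0 := by
      simp [PySem.List.pyGetD_natCast]
    have hin := inner_foldl (PySem.List.pyRange l (r + 1) 1) ((m : Int) + 1) (a.getD m 0) m
      ((List.range a.length).map (fun k => if k < m then hitB a l r k else false))
    have hhit : (PySem.List.pyRange l (r + 1) 1).any
        (fun j => j * ((m : Int) + 1) == a.getD m 0) = hitB a l r m := rfl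
    by_cases h1 : ((m : Int) + 1) * l > a.getD m 0
    · rw [if_pos (by rw [hidx, hget]; exact h1)]
      have hz : hitB a l r m = false := by
        rw [← hhit]; exact no_hit_of_guard l r _ _ (by omega) (Or.inl h1)
      apply List.map_congr_left; intro k hk
      by_cases hkm : k = m
      · subst hkm; simp [hz]
      · have : k < m ↔ k < m + 1 := by omega
        simp [this]
    · rw [if_neg (by rw [hidx, hget]; exact h1)]
      by_cases h2 : ((m : Int) + 1) * r < a.getD m 0
      · rw [if_pos (by rw [hidx, hget]; exact h2)]
        have hz : hitB a l r m = false := by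
          rw [← hhit]; exact no_hit_of_guard l r _ _ (by omega) (Or.inr h2)
        apply List.map_congr_left; intro k hk
        by_cases hkm : k = m
        · subst hkm; simp [hz]
        · have : k < m ↔ k < m + 1 := by omega
          simp [this]
      · rw [if_neg (by rw [hidx, hget]; exact h2)]
        rw [show ((m : Int) + 1 - 1) = ((m : Nat) : Int) from hidx]
        simp only [hget]
        rw [hin, hhit]
        by_cases hh : hitB a l r m = true
        · rw [if_pos hh, PySem.List.pySetD_natCast]
          apply List.ext_getElem
          · simp
          · intro k hk1 hk2
            simp only [List.getElem_set, List.getElem_map, List.getElem_range]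
            have hkm : k < a.length := by simpa using hk2
            by_cases hke : m = k
            · subst hke; simp [hh]
            · have : (k < m) ↔ (k < m + 1) := by omega
              simp [hke, this]
        · rw [if_neg hh]
          apply List.map_congr_left; intro k hk
          by_cases hkm : k = m
          · subst hkm; simp at hh; simp [hh]
          · have : k < m ↔ k < m + 1 := by omega
            simp [this]

-- the hit test equals B's divisibility/quotient test (i = k+1 > 0)
theorem hitB_eq (a : List Int) (l r : Int) (k : Nat) :
    hitB a l r k
      = (decide (PySem.Int.mod (a.getD k 0) ((k : Int) + 1) = 0) &&
         (decide (l ≤ PySem.Int.floordiv (a.getD k 0) ((k : Int) + 1)) &&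
          decide (PySem.Int.floordiv (a.getD k 0) ((k : Int) + 1) ≤ r))) := by
  set i : Int := (k : Int) + 1 with hi
  have hip : 0 < i := by positivity
  set x : Int := a.getD k 0 with hx
  rw [Bool.eq_iff_iff]
  unfold hitB
  rw [← hi, ← hx]
  simp only [List.any_eq_true, PySem.List.mem_pyRange_one, beq_iff_eq, Bool.and_eq_true,
    decide_eq_true_eq, PySem.Int.mod_eq_zero_iff_dvd,
    PySem.Int.floordiv_eq_ediv_of_pos hip]
  constructor
  · rintro ⟨j, ⟨hl, hr⟩, hj⟩
    have hdvd : i ∣ x := ⟨j, by rw [← hj]; ring⟩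
    have hq : x / i = j := by
      rw [← hj]; exact Int.mul_ediv_cancel j (by omega)
    exact ⟨hdvd, by omega, by omega⟩
  · rintro ⟨hdvd, hl, hr⟩
    refine ⟨x / i, ⟨hl, by omega⟩, ?_⟩
    exact Int.ediv_mul_cancel hdvd

-- ===== VERDICT (by name: the statement is the Claim_ definition above) =====
theorem boundedRatio_spec : Claim_equal_boundedRatio := by
  intro a l r _
  unfold Spec_boundedRatio boundedRatio boundedRatio_alt
  rw [outer_loop a l r a.length le_rfl]
  rw [PySem.List.enumerate_eq_map_pyRange (d := 0), List.map_map]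
  simp only [PySem.List.len_eq]
  rw [PySem.List.pyRange_zero_nat]
  rw [List.map_map]
  apply List.map_congr_left
  intro k hk
  have hkl : k < a.length := List.mem_range.mp hk
  simp only [Function.comp, PySem.List.pyGetD_natCast]
  rw [if_pos hkl, hitB_eq]
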